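-- pv_equiv track=rewrite | github.com/powerfulhang/Calculator | calculator_engine.py | _tokenize_prog
-- ===== SOURCE A (Python) =====
-- from typing import Callable, Dict, List, Tuple
--
-- _PROG_OP_SET: set = {'+', '-', '*', '/', 'M', '&', '|', '^', '<', '>'}
--
-- def valid_digits(base: int) -> set:
--     if base == 2:
--         return {'0', '1'}
--     if base == 8:
--         return set('01234567')
--     if base == 10:
--         return set('0123456789')
--     if base == 16:
--         return set('0123456789ABCDEF')
--     raise ValueError(f'不支持的进制: {base}')
--
-- def _tokenize_prog(expr: str, base: int) -> List[Tuple[str, str]]: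
--     """Tokenize a programmer-mode expression into (type, value) pairs."""
--     tokens: List[Tuple[str, str]] = []
--     current: List[str] = []
--     valid = valid_digits(base)
--
--     for ch in expr.upper():
--         if ch in valid:
--             current.append(ch)
--         elif ch in _PROG_OP_SET:
--             if current:
--                 tokens.append(('num', ''.join(current)))
--                 current.clear()
--             tokens.append(('op', ch))
--         else:
--             raise ValueError(f"字符 '{ch}' 不是有效的 {base} 进制数字")
--
--     if current:
--         tokens.append(('num', ''.join(current)))
--     return tokens
-- ===== SOURCE B (Python) =====
-- _PROG_OP_SET: set = {'+', '-', '*', '/', 'M', '&', '|', '^', '<', '>'}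
--
-- def valid_digits(base: int) -> set:
--     if base == 2:
--         return {'0', '1'}
--     if base == 8:
--         return set('01234567')
--     if base == 10:
--         return set('0123456789')
--     if base == 16:
--         return set('0123456789ABCDEF')
--     raise ValueError(f'不支持的进制: {base}')
--
-- def _tokenize_prog(expr, base):
--     """Tokenize by extracting maximal digit runs with an index scan (no char accumulator)."""
--     valid = valid_digits(base)
--     s = expr.upper()
--     tokens = []
--     i, n = 0, len(s)
--     while i < n:
--         ch = s[i]
--         if ch in valid:
--             j = i + 1
--             while j < n and s[j] in valid:
--                 j += 1
--             tokens.append(('num', s[i:j]))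
--             i = j
--         elif ch in _PROG_OP_SET:
--             tokens.append(('op', ch))
--             i += 1
--         else:
--             raise ValueError(f"字符 '{ch}' 不是有效的 {base} 进制数字")
--     return tokens
-- ===== Notes on version B (the rewrite author's own statement) =====
-- stated objective: idiomatic
-- what changed: B replaces A's per-character accumulator with deferred flushes by an index scan that slices each maximal digit run out of the string in one step and emits its token immediately.
import Mathlib
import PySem

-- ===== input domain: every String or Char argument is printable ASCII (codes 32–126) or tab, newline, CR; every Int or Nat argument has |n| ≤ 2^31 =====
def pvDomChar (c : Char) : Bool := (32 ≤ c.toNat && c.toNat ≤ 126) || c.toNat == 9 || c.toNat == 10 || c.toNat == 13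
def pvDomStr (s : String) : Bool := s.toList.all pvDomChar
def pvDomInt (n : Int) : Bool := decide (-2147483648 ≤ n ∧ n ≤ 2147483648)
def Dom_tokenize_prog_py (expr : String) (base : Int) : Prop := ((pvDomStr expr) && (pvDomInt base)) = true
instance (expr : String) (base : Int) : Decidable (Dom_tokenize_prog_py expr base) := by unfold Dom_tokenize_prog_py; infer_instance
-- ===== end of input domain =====

-- B extracts maximal digit runs by run-scanning instead of A's per-character accumulator; proved equal on all inputs where A returns (Pre_ excludes the ValueError cases: bad base or an invalid character).


-- ===== PORT A =====
def pvProgOps : List Char := ['+', '-', '*', '/', 'M', '&', '|', '^', '<', '>']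

-- valid_digits; the raise-on-bad-base path is excluded by Pre_, the port returns [] there
def pvValidDigits (base : Int) : List Char :=
  if base = 2 then ['0', '1']
  else if base = 8 then "01234567".toList
  else if base = 10 then "0123456789".toList
  else if base = 16 then "0123456789ABCDEF".toList
  else []

-- A's for-loop: state (tokens, current); the raise branch (excluded by Pre_) returns tokens
def pvTokA (valid : List Char) : List (String × String) → List Char → List Char → List (String × String)
  | tokens, current, [] => if current ≠ [] then tokens ++ [("num", String.mk current)] else tokens
  | tokens, current, ch :: rest =>
    if ch ∈ valid then pvTokA valid tokens (current ++ [ch]) rest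
    else if ch ∈ pvProgOps then
      pvTokA valid ((if current ≠ [] then tokens ++ [("num", String.mk current)] else tokens)
                    ++ [("op", String.mk [ch])]) [] rest
    else tokens

def tokenize_prog_py (expr : String) (base : Int) : List (String × String) :=
  pvTokA (pvValidDigits base) [] [] (PySem.Str.upper expr).toList

-- ===== PORT B =====
-- B's inner while: split off the maximal valid-digit run (the run and the remainder)
def pvRun (valid : List Char) : List Char → List Char × List Char
  | [] => ([], [])
  | c :: cs => if c ∈ valid then
      let p := pvRun valid cs
      (c :: p.1, p.2)
    else ([], c :: cs)

theorem pvRun_rest_le (valid : List Char) : ∀ l : List Char, (pvRun valid l).2.length ≤ l.length := by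
  intro l
  induction l with
  | nil => simp [pvRun]
  | cons c cs ih =>
    simp only [pvRun]
    split
    · exact Nat.le_succ_of_le ih
    · simp

-- B's outer while-loop; the raise branch (excluded by Pre_) returns []
def pvTokB (valid : List Char) : List Char → List (String × String)
  | [] => []
  | c :: cs =>
    if c ∈ valid then
      let p := pvRun valid cs
      ("num", String.mk (c :: p.1)) :: pvTokB valid p.2
    else if c ∈ pvProgOps then ("op", String.mk [c]) :: pvTokB valid cs
    else []
termination_by l => l.length
decreasing_by
  · exact Nat.lt_succ_of_le (pvRun_rest_le valid cs)
  · simp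

def tokenize_prog_py_alt (expr : String) (base : Int) : List (String × String) :=
  pvTokB (pvValidDigits base) (PySem.Str.upper expr).toList

-- ===== PRECONDITION & SPEC =====
-- Pre_ = exactly the inputs on which A returns: a supported base, and every character of the
-- upper-cased expression is a valid digit of that base or an operator (otherwise A raises ValueError).
def Pre_tokenize_prog_py (expr : String) (base : Int) : Prop :=
  (base = 2 ∨ base = 8 ∨ base = 10 ∨ base = 16) ∧
  (PySem.Str.upper expr).toList.all
    (fun c => (pvValidDigits base).contains c || pvProgOps.contains c) = true

instance (expr : String) (base : Int) : Decidable (Pre_tokenize_prog_py expr base) := by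
  unfold Pre_tokenize_prog_py; infer_instance

def pvWitness_tokenize_prog_py : String × Int := ("1f+2*c", 16)

def Spec_tokenize_prog_py (expr : String) (base : Int) (out : List (String × String)) : Prop := out = tokenize_prog_py_alt expr base
instance (expr : String) (base : Int) (out : List (String × String)) : Decidable (Spec_tokenize_prog_py expr base out) := by unfold Spec_tokenize_prog_py; infer_instance

-- ===== CLAIM (what is proved, stated in full; the proofs are below) =====
def Claim_equal_tokenize_prog_py : Prop := ∀ (expr : String) (base : Int), Dom_tokenize_prog_py expr base → Pre_tokenize_prog_py expr base → Spec_tokenize_prog_py expr base (tokenize_prog_py expr base)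

-- ===== LEMMAS AND PROOFS =====

-- A consuming a (possibly empty) leading digit run with a nonempty accumulator:
-- it flushes accumulator ++ run as one num token once the run ends.
theorem pvTokA_run (valid : List Char) : ∀ (l cur : List Char) (tokens : List (String × String)),
    cur ≠ [] → (∀ c ∈ l, c ∈ valid ∨ c ∈ pvProgOps) →
    pvTokA valid tokens cur l =
      pvTokA valid (tokens ++ [("num", String.mk (cur ++ (pvRun valid l).1))]) [] (pvRun valid l).2 := by
  intro l
  induction l with
  | nil =>
    intro cur tokens hcur _
    simp [pvTokA, pvRun, hcur]
  | cons d ds ih =>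
    intro cur tokens hcur hgood
    by_cases hd : d ∈ valid
    · have := ih (cur ++ [d]) tokens (by simp) (fun c hc => hgood c (List.mem_cons_of_mem _ hc))
      simp only [pvTokA, pvRun, hd, if_pos] at *
      simpa using this
    · have hop : d ∈ pvProgOps := (hgood d (List.mem_cons_self)).resolve_left hd
      simp [pvTokA, pvRun, hd, hop, hcur]

-- Main invariant: with empty accumulator, A's loop appends exactly B's token list.
theorem pvTok_main (valid : List Char) : ∀ (n : ℕ) (l : List Char), l.length ≤ n →
    (∀ c ∈ l, c ∈ valid ∨ c ∈ pvProgOps) →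
    ∀ tokens : List (String × String), pvTokA valid tokens [] l = tokens ++ pvTokB valid l := by
  intro n
  induction n with
  | zero =>
    intro l hl _ tokens
    have : l = [] := List.length_eq_zero_iff.mp (Nat.le_zero.mp hl)
    simp [this, pvTokA, pvTokB]
  | succ n ih =>
    intro l hl hgood tokens
    match l with
    | [] => simp [pvTokA, pvTokB]
    | c :: cs =>
      have hgs : ∀ x ∈ cs, x ∈ valid ∨ x ∈ pvProgOps :=
        fun x hx => hgood x (List.mem_cons_of_mem _ hx)
      by_cases hc : c ∈ valid
      · have h1 : pvTokA valid tokens [] (c :: cs) = pvTokA valid tokens [c] cs := by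
          simp [pvTokA, hc]
        rw [h1, pvTokA_run valid cs [c] tokens (by simp) hgs]
        have hrest : (pvRun valid cs).2.length ≤ n :=
          le_trans (pvRun_rest_le valid cs) (Nat.lt_succ_iff.mp (Nat.lt_of_lt_of_le (Nat.lt_succ_of_le (Nat.le_refl _)) hl))
        have hgr : ∀ x ∈ (pvRun valid cs).2, x ∈ valid ∨ x ∈ pvProgOps := by
          intro x hx
          apply hgs
          -- (pvRun valid cs).2 is a suffix of cs
          have : ∀ m : List Char, x ∈ (pvRun valid m).2 → x ∈ m := by
            intro m
            induction m with
            | nil => simp [pvRun]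
            | cons a as iha =>
              simp only [pvRun]
              split
              · intro h; exact List.mem_cons_of_mem _ (iha h)
              · intro h; exact h
          exact this cs hx
        rw [ih _ hrest hgr]
        simp [pvTokB, hc]
      · have hop : c ∈ pvProgOps := (hgood c (List.mem_cons_self)).resolve_left hc
        have h1 : pvTokA valid tokens [] (c :: cs) =
            pvTokA valid (tokens ++ [("op", String.mk [c])]) [] cs := by
          simp [pvTokA, hc, hop]
        rw [h1, ih cs (Nat.lt_succ_iff.mp (Nat.lt_of_lt_of_le (Nat.lt_succ_of_le (Nat.le_refl _)) hl)) hgs]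
        simp [pvTokB, hc, hop]

-- ===== VERDICT (by name: the statement is the Claim_ definition above) =====
theorem tokenize_prog_py_spec : Claim_equal_tokenize_prog_py := by
  intro expr base _ hpre
  have hgood : ∀ c ∈ (PySem.Str.upper expr).toList,
      c ∈ pvValidDigits base ∨ c ∈ pvProgOps := by
    intro c hc
    simpa using List.all_eq_true.mp hpre.2 c hc
  unfold Spec_tokenize_prog_py tokenize_prog_py tokenize_prog_py_alt
  simpa using pvTok_main (pvValidDigits base) _ _ (Nat.le_refl _) hgood []
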